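-- pv_equiv track=rewrite | github.com/AA-CubeSat-Team/testBed_rpi | spiFull.py | crcAppend
-- ===== SOURCE A (Python) =====
-- from collections.abc import Iterable
--
-- crcTable = [0x0000,0x1021,0x2042,0x3063,0x4084,0x50a5,0x60c6,0x70e7,
--             0x8108,0x9129,0xa14a,0xb16b,0xc18c,0xd1ad,0xe1ce,0xf1ef,
--             0x1231,0x0210,0x3273,0x2252,0x52b5,0x4294,0x72f7,0x62d6,
--             0x9339,0x8318,0xb37b,0xa35a,0xd3bd,0xc39c,0xf3ff,0xe3de,
--             0x2462,0x3443,0x0420,0x1401,0x64e6,0x74c7,0x44a4,0x5485,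
--             0xa56a,0xb54b,0x8528,0x9509,0xe5ee,0xf5cf,0xc5ac,0xd58d,
--             0x3653,0x2672,0x1611,0x0630,0x76d7,0x66f6,0x5695,0x46b4,
--             0xb75b,0xa77a,0x9719,0x8738,0xf7df,0xe7fe,0xd79d,0xc7bc,
--             0x48c4,0x58e5,0x6886,0x78a7,0x0840,0x1861,0x2802,0x3823,
--             0xc9cc,0xd9ed,0xe98e,0xf9af,0x8948,0x9969,0xa90a,0xb92b,
--             0x5af5,0x4ad4,0x7ab7,0x6a96,0x1a71,0x0a50,0x3a33,0x2a12,
--             0xdbfd,0xcbdc,0xfbbf,0xeb9e,0x9b79,0x8b58,0xbb3b,0xab1a,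
--             0x6ca6,0x7c87,0x4ce4,0x5cc5,0x2c22,0x3c03,0x0c60,0x1c41,
--             0xedae,0xfd8f,0xcdec,0xddcd,0xad2a,0xbd0b,0x8d68,0x9d49,
--             0x7e97,0x6eb6,0x5ed5,0x4ef4,0x3e13,0x2e32,0x1e51,0x0e70,
--             0xff9f,0xefbe,0xdfdd,0xcffc,0xbf1b,0xaf3a,0x9f59,0x8f78,
--             0x9188,0x81a9,0xb1ca,0xa1eb,0xd10c,0xc12d,0xf14e,0xe16f,
--             0x1080,0x00a1,0x30c2,0x20e3,0x5004,0x4025,0x7046,0x6067,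
--             0x83b9,0x9398,0xa3fb,0xb3da,0xc33d,0xd31c,0xe37f,0xf35e,
--             0x02b1,0x1290,0x22f3,0x32d2,0x4235,0x5214,0x6277,0x7256,
--             0xb5ea,0xa5cb,0x95a8,0x8589,0xf56e,0xe54f,0xd52c,0xc50d,
--             0x34e2,0x24c3,0x14a0,0x0481,0x7466,0x6447,0x5424,0x4405,
--             0xa7db,0xb7fa,0x8799,0x97b8,0xe75f,0xf77e,0xc71d,0xd73c,
--             0x26d3,0x36f2,0x0691,0x16b0,0x6657,0x7676,0x4615,0x5634,
--             0xd94c,0xc96d,0xf90e,0xe92f,0x99c8,0x89e9,0xb98a,0xa9ab,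
--             0x5844,0x4865,0x7806,0x6827,0x18c0,0x08e1,0x3882,0x28a3,
--             0xcb7d,0xdb5c,0xeb3f,0xfb1e,0x8bf9,0x9bd8,0xabbb,0xbb9a,
--             0x4a75,0x5a54,0x6a37,0x7a16,0x0af1,0x1ad0,0x2ab3,0x3a92,
--             0xfd2e,0xed0f,0xdd6c,0xcd4d,0xbdaa,0xad8b,0x9de8,0x8dc9,
--             0x7c26,0x6c07,0x5c64,0x4c45,0x3ca2,0x2c83,0x1ce0,0x0cc1,
--             0xef1f,0xff3e,0xcf5d,0xdf7c,0xaf9b,0xbfba,0x8fd9,0x9ff8,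
--             0x6e17,0x7e36,0x4e55,0x5e74,0x2e93,0x3eb2,0x0ed1,0x1ef0];
--
-- def crcAppend(payloadArr1):
--     crcValue = 0xFFFF
--     for iterByte in payloadArr1:
--         crcValue = (crcValue << 8) ^ crcTable[((crcValue >> 8) ^ iterByte) & 0x00FF];
--         crcValue = ((1 << 16) - 1)  &  crcValue;
--     crcSplit = [crcValue >> 8, crcValue & 0x00FF]
--     payloadArrCRC = flatList([payloadArr1,crcSplit[1],crcSplit[0]])
--     return payloadArrCRC
--
-- def flatFuncAux(items):
--     for x in items:
--         if isinstance(x, Iterable) and not isinstance(x, (str, bytes)):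
--             yield from flatFuncAux(x)
--         else:
--             yield x
--
-- def flatList(inpArr1):
--     return list(flatFuncAux(inpArr1))
-- ===== SOURCE B (Python) =====
-- def crcAppend(payloadArr1):
--     crc = 0xFFFF
--     for byte in payloadArr1:
--         crc ^= (byte & 0xFF) << 8
--         for _ in range(8):
--             if crc & 0x8000:
--                 crc = ((crc << 1) ^ 0x1021) & 0xFFFF
--             else:
--                 crc = (crc << 1) & 0xFFFF
--     return payloadArr1 + [crc & 0xFF, crc >> 8]
-- ===== Notes on version B (the rewrite author's own statement) =====
-- stated objective: alternative
-- what changed: Replaces A's 256-entry CRC lookup table with the standard bitwise CRC-16/CCITT computation (xor the masked byte into the high byte, then eight shift/conditional-xor rounds per byte), with no table at all.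
import Mathlib
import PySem

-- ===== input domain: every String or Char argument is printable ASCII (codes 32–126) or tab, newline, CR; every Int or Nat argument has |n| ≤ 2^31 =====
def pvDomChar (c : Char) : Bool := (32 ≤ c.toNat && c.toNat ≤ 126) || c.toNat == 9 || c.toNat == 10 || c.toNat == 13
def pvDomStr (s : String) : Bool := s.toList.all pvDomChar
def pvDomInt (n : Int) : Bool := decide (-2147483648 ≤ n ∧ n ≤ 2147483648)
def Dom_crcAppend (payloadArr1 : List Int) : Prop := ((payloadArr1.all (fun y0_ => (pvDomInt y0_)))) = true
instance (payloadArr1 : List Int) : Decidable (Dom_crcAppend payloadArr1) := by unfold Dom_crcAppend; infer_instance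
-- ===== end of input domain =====

-- B replaces A's 256-entry table lookup with the standard bitwise CRC-16/CCITT loop (xor the
-- masked byte into the high byte, then eight shift/conditional-xor rounds); an alternative
-- decomposition of the same computation. Return value only (neither program mutates its argument).

-- ===== PORT A =====
def crcTableL : List Int :=
  [0, 4129, 8258, 12387, 16516, 20645, 24774, 28903,
   33032, 37161, 41290, 45419, 49548, 53677, 57806, 61935,
   4657, 528, 12915, 8786, 21173, 17044, 29431, 25302,
   37689, 33560, 45947, 41818, 54205, 50076, 62463, 58334,
   9314, 13379, 1056, 5121, 25830, 29895, 17572, 21637,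
   42346, 46411, 34088, 38153, 58862, 62927, 50604, 54669,
   13907, 9842, 5649, 1584, 30423, 26358, 22165, 18100,
   46939, 42874, 38681, 34616, 63455, 59390, 55197, 51132,
   18628, 22757, 26758, 30887, 2112, 6241, 10242, 14371,
   51660, 55789, 59790, 63919, 35144, 39273, 43274, 47403,
   23285, 19156, 31415, 27286, 6769, 2640, 14899, 10770,
   56317, 52188, 64447, 60318, 39801, 35672, 47931, 43802,
   27814, 31879, 19684, 23749, 11298, 15363, 3168, 7233,
   60846, 64911, 52716, 56781, 44330, 48395, 36200, 40265,
   32407, 28342, 24277, 20212, 15891, 11826, 7761, 3696,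
   65439, 61374, 57309, 53244, 48923, 44858, 40793, 36728,
   37256, 33193, 45514, 41451, 53516, 49453, 61774, 57711,
   4224, 161, 12482, 8419, 20484, 16421, 28742, 24679,
   33721, 37784, 41979, 46042, 49981, 54044, 58239, 62302,
   689, 4752, 8947, 13010, 16949, 21012, 25207, 29270,
   46570, 42443, 38312, 34185, 62830, 58703, 54572, 50445,
   13538, 9411, 5280, 1153, 29798, 25671, 21540, 17413,
   42971, 47098, 34713, 38840, 59231, 63358, 50973, 55100,
   9939, 14066, 1681, 5808, 26199, 30326, 17941, 22068,
   55628, 51565, 63758, 59695, 39368, 35305, 47498, 43435,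
   22596, 18533, 30726, 26663, 6336, 2273, 14466, 10403,
   52093, 56156, 60223, 64286, 35833, 39896, 43963, 48026,
   19061, 23124, 27191, 31254, 2801, 6864, 10931, 14994,
   64814, 60687, 56684, 52557, 48554, 44427, 40424, 36297,
   31782, 27655, 23652, 19525, 15522, 11395, 7392, 3265,
   61215, 65342, 53085, 57212, 44955, 49082, 36825, 40952,
   28183, 32310, 20053, 24180, 11923, 16050, 3793, 7920]

-- loop body of A: crcValue = (crcValue << 8) ^ crcTable[((crcValue >> 8) ^ iterByte) & 0xFF];
--                 crcValue = ((1 << 16) - 1) & crcValue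
-- the table index is (… & 0xFF) ∈ [0,255], always in range, so the .getD 0 default never fires
def crcStepA (crcValue iterByte : Int) : Int :=
  PySem.Int.band 65535
    (PySem.Int.bxor (crcValue <<< (8:Nat))
      ((PySem.List.pyGet? crcTableL (PySem.Int.band (PySem.Int.bxor (crcValue >>> (8:Nat)) iterByte) 255)).getD 0))

-- flatList([payloadArr1, crcSplit[1], crcSplit[0]]) : every element of payloadArr1 is an int
-- (not Iterable), so flatFuncAux yields them unchanged; ported at this call shape as ++.
def crcAppend (payloadArr1 : List Int) : List Int :=
  let crcValue : Int := payloadArr1.foldl crcStepA 65535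
  let crcSplit : List Int := [crcValue >>> (8:Nat), PySem.Int.band crcValue 255]
  payloadArr1 ++ [(PySem.List.pyGet? crcSplit 1).getD 0, (PySem.List.pyGet? crcSplit 0).getD 0]

-- ===== PORT B =====
def crcRound (crc : Int) : Int :=
  if PySem.Int.band crc 32768 ≠ 0 then
    PySem.Int.band (PySem.Int.bxor (crc <<< (1:Nat)) 4129) 65535
  else
    PySem.Int.band (crc <<< (1:Nat)) 65535

def crcByteB (crc byte : Int) : Int :=
  (PySem.List.pyRange 0 8 1).foldl (fun c _ => crcRound c)
    (PySem.Int.bxor crc (PySem.Int.band byte 255 <<< (8:Nat)))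

def crcAppend_alt (payloadArr1 : List Int) : List Int :=
  let crc : Int := payloadArr1.foldl crcByteB 65535
  payloadArr1 ++ [PySem.Int.band crc 255, crc >>> (8:Nat)]

-- ===== PRECONDITION & SPEC =====
def Spec_crcAppend (payloadArr1 : List Int) (out : List Int) : Prop := out = crcAppend_alt payloadArr1
instance (payloadArr1 : List Int) (out : List Int) : Decidable (Spec_crcAppend payloadArr1 out) := by unfold Spec_crcAppend; infer_instance

-- ===== CLAIM (what is proved, stated in full; the proofs are below) =====
def Claim_equal_crcAppend : Prop := ∀ (payloadArr1 : List Int), Dom_crcAppend payloadArr1 → Spec_crcAppend payloadArr1 (crcAppend payloadArr1)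

-- ===== LEMMAS AND PROOFS =====

-- Nat-level model of one CRC round / eight rounds (all values stay in [0, 65536))
def roundN (c : Nat) : Nat :=
  if c &&& 32768 ≠ 0 then ((c <<< 1) ^^^ 4129) &&& 65535 else (c <<< 1) &&& 65535
def r8N (c : Nat) : Nat := roundN (roundN (roundN (roundN (roundN (roundN (roundN (roundN c)))))))

theorem and_mask_mod (a m : Nat) : a &&& (2 ^ m - 1) = a % 2 ^ m := by
  apply Nat.eq_of_testBit_eq; intro i
  simp [Nat.testBit_mod_two_pow]

theorem and65535 (a : Nat) : a &&& 65535 = a % 65536 := by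
  have := and_mask_mod a 16; norm_num at this; exact this

theorem and255 (a : Nat) : a &&& 255 = a % 256 := by
  have := and_mask_mod a 8; norm_num at this; exact this

theorem roundN_lt (c : Nat) : roundN c < 65536 := by
  unfold roundN; split <;> (rw [and65535]; exact Nat.mod_lt _ (by norm_num))

theorem r8N_lt (c : Nat) : r8N c < 65536 := by unfold r8N; exact roundN_lt _

theorem roundN_eq (z : Nat) :
    roundN z = ((z <<< 1) &&& 65535) ^^^ (if z.testBit 15 then 4129 else 0) := by
  unfold roundN
  have hb : z &&& 32768 = (z.testBit 15).toNat * 32768 := by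
    have := Nat.and_two_pow z 15; norm_num at this; exact this
  by_cases h : z.testBit 15
  · rw [if_pos h]
    rw [if_pos (by rw [hb, h]; norm_num)]
    rw [Nat.and_xor_distrib_right]
    norm_num [show (4129 &&& 65535 : Nat) = 4129 from by decide]
  · rw [if_neg h]
    rw [if_neg (by rw [hb]; simp [h])]
    simp

theorem roundN_linear (x y : Nat) : roundN (x ^^^ y) = roundN x ^^^ roundN y := by
  rw [roundN_eq, roundN_eq, roundN_eq, Nat.shiftLeft_xor_distrib, Nat.and_xor_distrib_right,
      Nat.testBit_xor]
  by_cases hx : x.testBit 15 <;> by_cases hy : y.testBit 15 <;>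
    simp [hx, hy, Nat.xor_comm, Nat.xor_left_comm]

theorem r8N_linear (x y : Nat) : r8N (x ^^^ y) = r8N x ^^^ r8N y := by
  unfold r8N; simp only [roundN_linear]

set_option maxRecDepth 10000 in
theorem r8N_lo (lo : Nat) (h : lo < 256) : r8N lo = lo <<< 8 := by
  have hall : (List.range 256).all (fun lo => r8N lo == lo <<< 8) = true := by decide
  rw [List.all_eq_true] at hall
  exact eq_of_beq (hall lo (List.mem_range.mpr h))

-- the table of A is exactly eight bitwise rounds applied to k << 8
set_option maxRecDepth 100000 in
theorem table_eq (k : Nat) (h : k < 256) :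
    PySem.List.pyGet? crcTableL (k : Int) = some ((r8N (k <<< 8) : Nat) : Int) := by
  have hall : (List.range 256).all
      (fun k => PySem.List.pyGet? crcTableL (k : Int) == some ((r8N (k <<< 8) : Nat) : Int)) = true := by decide
  rw [List.all_eq_true] at hall
  exact eq_of_beq (hall k (List.mem_range.mpr h))

-- cN = (cN >>> 8) <<< 8  ^^^  (cN &&& 255)
theorem nat_decomp (c : Nat) : c = ((c >>> 8) <<< 8) ^^^ (c &&& 255) := by
  apply Nat.eq_of_testBit_eq; intro i
  have h255 : (255:Nat) = 2^8-1 := by norm_num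
  rw [Nat.testBit_xor, Nat.testBit_shiftLeft, Nat.testBit_and, h255,
      Nat.testBit_two_pow_sub_one, Nat.testBit_shiftRight]
  rcases Nat.lt_or_ge i 8 with h | h
  · simp [h, Nat.not_le.mpr h]
  · simp [h, Nat.not_lt.mpr h, show 8 + (i - 8) = i from by omega]

-- the heart: table step = eight bitwise rounds, over Nat
theorem coreN (c j : Nat) :
    65535 &&& ((c <<< 8) ^^^ r8N (((c >>> 8) ^^^ j) <<< 8)) = r8N (c ^^^ (j <<< 8)) := by
  set hi := c >>> 8 with hhi
  set lo := c &&& 255 with hlo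
  have hlo256 : lo < 256 := by rw [hlo, and255]; exact Nat.mod_lt _ (by norm_num)
  have hdec : c = (hi <<< 8) ^^^ lo := nat_decomp c
  have hrhs : c ^^^ (j <<< 8) = ((hi ^^^ j) <<< 8) ^^^ lo := by
    conv_lhs => rw [hdec]
    rw [Nat.shiftLeft_xor_distrib, Nat.xor_assoc, Nat.xor_assoc, Nat.xor_comm lo]
  rw [hrhs, r8N_linear, r8N_lo lo hlo256]
  have hmask : 65535 &&& (c <<< 8) = lo <<< 8 := by
    rw [Nat.and_comm, and65535, Nat.shiftLeft_eq, Nat.shiftLeft_eq, hlo, and255]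
    norm_num
    omega
  rw [Nat.and_xor_distrib_left, hmask, Nat.and_comm 65535, and65535,
      Nat.mod_eq_of_lt (r8N_lt _), Nat.xor_comm]

-- 255 - z complements the low 8 bits
set_option maxRecDepth 10000 in
theorem sub255 (z : Nat) (h : z ≤ 255) : 255 - z = 255 ^^^ z := by
  have hall : (List.range 256).all (fun z => 255 - z == 255 ^^^ z) = true := by decide
  rw [List.all_eq_true] at hall
  exact eq_of_beq (hall z (List.mem_range.mpr (by omega)))

theorem natCast_shiftl (m k : Nat) : ((m : Int) <<< k) = ((m <<< k : Nat) : Int) :=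
  Int.mem_toNat?.mp rfl

theorem natCast_shiftr (m k : Nat) : ((m : Int) >>> k) = ((m >>> k : Nat) : Int) :=
  Int.mem_toNat?.mp rfl

-- b & 255 over Int: value and bounds (b possibly negative)
theorem band255_bounds (b : Int) : 0 ≤ PySem.Int.band b 255 ∧ PySem.Int.band b 255 < 256 := by
  unfold PySem.Int.band
  split
  · refine ⟨by positivity, ?_⟩
    have : b.toNat &&& (255:Int).toNat ≤ 255 := Nat.and_le_right
    omega
  · rw [if_pos (by norm_num)]
    have h1 : (255:Int).toNat &&& (-b - 1).toNat ≤ 255 := Nat.and_le_left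
    omega

-- (x ^ b) & 255 = x ^ (b & 255) for 0 ≤ x < 256 (b arbitrary, possibly negative)
theorem mask_xor (x : Nat) (hx : x < 256) (b : Int) :
    PySem.Int.band (PySem.Int.bxor (x : Int) b) 255 = PySem.Int.bxor (x : Int) (PySem.Int.band b 255) := by
  have hx255 : x &&& 255 = x := by rw [and255, Nat.mod_eq_of_lt hx]
  by_cases hb : 0 ≤ b
  · obtain ⟨n, rfl⟩ := Int.eq_ofNat_of_zero_le hb
    rw [show ((n:Nat):Int) = ((n:Nat):Int) from rfl, PySem.Int.bxor_natCast,
        show (255:Int) = ((255:Nat):Int) from rfl, PySem.Int.band_natCast,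
        PySem.Int.band_natCast, PySem.Int.bxor_natCast]
    congr 1
    rw [Nat.and_xor_distrib_right, hx255]
  · -- negative byte: both sides through the two's-complement branches of band/bxor
    set m : Nat := (-b - 1).toNat with hm
    have hxb : PySem.Int.bxor (x : Int) b = -(((x ^^^ m : Nat) : Int)) - 1 := by
      unfold PySem.Int.bxor
      rw [if_pos (by positivity), if_neg hb]
      have h1 : ((x:Int)).toNat = x := by omega
      rw [h1]
    have hbandb : PySem.Int.band b 255 = ((255 - (255 &&& m) : Nat) : Int) := by
      unfold PySem.Int.band
      rw [if_neg hb, if_pos (by norm_num)]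
      norm_num [← hm, show Int.toNat 255 = (255:Nat) from rfl]
    rw [hxb, hbandb, PySem.Int.bxor_natCast]
    have hneg : PySem.Int.band (-(((x ^^^ m : Nat) : Int)) - 1) 255
        = ((255 - (255 &&& (x ^^^ m)) : Nat) : Int) := by
      unfold PySem.Int.band
      rw [if_neg (by omega), if_pos (by norm_num)]
      have h2 : (-(-(((x ^^^ m : Nat) : Int)) - 1) - 1).toNat = x ^^^ m := by omega
      norm_num [h2]
      rw [show Int.toNat 255 = (255:Nat) from rfl]
    rw [hneg]
    congr 1
    rw [sub255 _ Nat.and_le_left, sub255 _ Nat.and_le_left,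
        Nat.and_xor_distrib_left, Nat.and_comm 255 x, hx255, Nat.xor_left_comm]

theorem crcRound_cast (n : Nat) : crcRound (n : Int) = ((roundN n : Nat) : Int) := by
  unfold crcRound roundN
  rw [show (32768:Int) = ((32768:Nat):Int) from rfl, PySem.Int.band_natCast,
      natCast_shiftl]
  by_cases h : n &&& 32768 ≠ 0
  · rw [if_pos (by exact_mod_cast h), if_pos h,
        show (4129:Int) = ((4129:Nat):Int) from rfl, PySem.Int.bxor_natCast,
        show (65535:Int) = ((65535:Nat):Int) from rfl, PySem.Int.band_natCast,
        Nat.and_comm]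
  · rw [if_neg (by simpa using h), if_neg h,
        show (65535:Int) = ((65535:Nat):Int) from rfl, PySem.Int.band_natCast,
        Nat.and_comm]

theorem step_agree (c : Nat) (hc : c < 65536) (b : Int) :
    crcStepA (c : Int) b = crcByteB (c : Int) b ∧
      ∃ d : Nat, d < 65536 ∧ crcStepA (c : Int) b = (d : Int) := by
  obtain ⟨hj0, hj1⟩ := band255_bounds b
  set j : Nat := (PySem.Int.band b 255).toNat with hjdef
  have hjcast : PySem.Int.band b 255 = (j : Int) := (Int.toNat_of_nonneg hj0).symm
  have hj : j < 256 := by omega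
  have hhi : c >>> 8 < 256 := by
    rw [Nat.shiftRight_eq_div_pow]; omega
  -- A's step
  have hA : crcStepA (c : Int) b = ((65535 &&& ((c <<< 8) ^^^ r8N (((c >>> 8) ^^^ j) <<< 8)) : Nat) : Int) := by
    unfold crcStepA
    rw [natCast_shiftr, mask_xor _ hhi b, hjcast, PySem.Int.bxor_natCast,
        table_eq _ (Nat.xor_lt_two_pow (n := 8) hhi hj), Option.getD_some,
        natCast_shiftl, PySem.Int.bxor_natCast,
        show (65535:Int) = ((65535:Nat):Int) from rfl, PySem.Int.band_natCast]
  -- B's step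
  have hB : crcByteB (c : Int) b = ((r8N (c ^^^ (j <<< 8)) : Nat) : Int) := by
    unfold crcByteB
    rw [hjcast, natCast_shiftl, PySem.Int.bxor_natCast,
        show PySem.List.pyRange 0 8 1 = [0, 1, 2, 3, 4, 5, 6, 7] from by decide]
    simp only [List.foldl_cons, List.foldl_nil, crcRound_cast]
    rfl
  refine ⟨?_, 65535 &&& ((c <<< 8) ^^^ r8N (((c >>> 8) ^^^ j) <<< 8)), ?_, hA⟩
  · rw [hA, hB, coreN c j]
  · rw [Nat.and_comm, and65535]; exact Nat.mod_lt _ (by norm_num)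

theorem fold_agree (l : List Int) : ∀ c : Nat, c < 65536 →
    l.foldl crcStepA (c : Int) = l.foldl crcByteB (c : Int) ∧
      ∃ d : Nat, d < 65536 ∧ l.foldl crcStepA (c : Int) = (d : Int) := by
  induction l with
  | nil => intro c hc; exact ⟨rfl, c, hc, rfl⟩
  | cons x xs ih =>
    intro c hc
    obtain ⟨heq, d, hd, hval⟩ := step_agree c hc x
    simp only [List.foldl_cons]
    rw [hval] at heq ⊢
    obtain ⟨h1, h2⟩ := ih d hd
    exact ⟨by rw [← heq, h1], h2⟩

-- ===== VERDICT (by name: the statement is the Claim_ definition above) =====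
theorem crcAppend_spec : Claim_equal_crcAppend := by
  intro p _
  unfold Spec_crcAppend crcAppend crcAppend_alt
  obtain ⟨heq, d, hd, hval⟩ := fold_agree p 65535 (by norm_num)
  norm_num at heq hval ⊢
  rw [heq]
  simp
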